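-- pv_equiv track=rewrite | github.com/neodymium6/rust_reveri | tmp.py | get_reverse_r
-- ===== SOURCE A (Python) =====
-- def get_need_r(i, j):
--     put = 1 << (7 - j)
--     state8 = i << 1
--     if state8 & put:
--         # puting already put position
--         # not happen in game
--         return 0
--     if state8 & (put >> 1) == 0:
--         # no opposite stone in right
--         return 0
--     put >>= 1
--     while state8 & put:
--         put >>= 1
--     return put
--
-- def get_reverse_r(i, j):
--     put = 1 << (7 - j)
--     state8 = i << 1
--     if get_need_r(i, j) == 0:
--         return 0
--     other = get_need_r(i, j)
--     res = 0
--     other = other << 1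
--     while other != put:
--         res |= other
--         other = other << 1
--     return res
-- ===== SOURCE B (Python) =====
-- def get_reverse_r(i, j):
--     put = 1 << (7 - j)
--     state8 = i << 1
--     if state8 & put:
--         return 0
--     res = 0
--     p = put >> 1
--     while state8 & p:
--         res += p
--         p >>= 1
--     return res
-- ===== Notes on version B (the rewrite author's own statement) =====
-- stated objective: simpler
-- what changed: A first scans right to locate the empty anchor cell (helper get_need_r, called twice) and then a second loop walks back up OR-ing in the stones between anchor and the placed disc; B is one helper-free right scan that accumulates the contiguous run of occupied cells directly as it walks.
import Mathlib
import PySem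

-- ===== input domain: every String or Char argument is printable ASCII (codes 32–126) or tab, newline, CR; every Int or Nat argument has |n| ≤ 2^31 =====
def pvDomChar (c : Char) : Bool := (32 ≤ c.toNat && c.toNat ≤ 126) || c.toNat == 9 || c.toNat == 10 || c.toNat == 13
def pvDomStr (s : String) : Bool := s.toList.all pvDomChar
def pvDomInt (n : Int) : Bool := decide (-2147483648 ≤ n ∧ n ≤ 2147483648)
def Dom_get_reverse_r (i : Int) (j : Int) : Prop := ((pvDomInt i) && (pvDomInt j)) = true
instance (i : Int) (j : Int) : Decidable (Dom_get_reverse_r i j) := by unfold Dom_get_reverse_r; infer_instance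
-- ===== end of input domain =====

-- B merges A's helper (which first finds the empty anchor cell) and A's fill loop into one
-- right-scan that accumulates the run of occupied cells directly; objective: simpler.

-- ===== PORT A =====

-- get_need_r's loop: while state8 & put: put >>= 1   (the '0 < put' conjunct is a totality
-- guard only: in A, put here is a positive power of two, and at put = 0 Python's test is false too)
def pvNeedLoop (state8 : Int) (put : Int) : Int :=
  if _h : 0 < put ∧ PySem.Int.band state8 put ≠ 0 then pvNeedLoop state8 (put >>> (1:Nat)) else put
termination_by put.toNat
decreasing_by
  have h1 : put >>> (1:Nat) = put / 2 := by simpa using Int.shiftRight_eq_div_pow put 1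
  omega

def get_need_r (i : Int) (j : Int) : Int :=
  let put : Int := (1:Int) <<< (7 - j).toNat   -- Python 1 << (7 - j); exact for j ≤ 7 (Python raises for j > 7, excluded by Pre_)
  let state8 : Int := i <<< (1:Nat)
  if PySem.Int.band state8 put ≠ 0 then 0
  else if PySem.Int.band state8 (put >>> (1:Nat)) = 0 then 0
  else pvNeedLoop state8 (put >>> (1:Nat))

-- get_reverse_r's loop: while other != put: res |= other; other = other << 1   (in A, other is a
-- power of two strictly below put, so 'other != put' coincides with the guard '0 < other ∧ other < put')
def pvRevLoop (put : Int) (other : Int) (res : Int) : Int :=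
  if _h : 0 < other ∧ other < put then pvRevLoop put (other <<< (1:Nat)) (PySem.Int.bor res other) else res
termination_by (put - other).toNat
decreasing_by
  have h1 : other <<< (1:Nat) = other * 2 := by simpa using Int.shiftLeft_eq other 1
  omega

def get_reverse_r (i : Int) (j : Int) : Int :=
  let put : Int := (1:Int) <<< (7 - j).toNat
  let _state8 : Int := i <<< (1:Nat)
  if get_need_r i j = 0 then 0
  else
    let other := get_need_r i j
    pvRevLoop put (other <<< (1:Nat)) 0

-- ===== PORT B =====

-- while state8 & p: res += p; p >>= 1   ('0 < p' is a totality guard only: p here is a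
-- nonnegative power of two or 0, and at p = 0 Python's test is false too)
def pvAccLoop (state8 : Int) (p : Int) (res : Int) : Int :=
  if _h : 0 < p ∧ PySem.Int.band state8 p ≠ 0 then pvAccLoop state8 (p >>> (1:Nat)) (res + p) else res
termination_by p.toNat
decreasing_by
  have h1 : p >>> (1:Nat) = p / 2 := by simpa using Int.shiftRight_eq_div_pow p 1
  omega

def get_reverse_r_alt (i : Int) (j : Int) : Int :=
  let put : Int := (1:Int) <<< (7 - j).toNat
  let state8 : Int := i <<< (1:Nat)
  if PySem.Int.band state8 put ≠ 0 then 0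
  else pvAccLoop state8 (put >>> (1:Nat)) 0

-- ===== PRECONDITION & SPEC =====
-- Pre_ excludes exactly the inputs where A raises: for j > 7 Python evaluates 1 << (7 - j)
-- with a negative shift count and raises ValueError (B raises there too).
def Pre_get_reverse_r (i : Int) (j : Int) : Prop := j ≤ 7
instance (i : Int) (j : Int) : Decidable (Pre_get_reverse_r i j) := by unfold Pre_get_reverse_r; infer_instance
def pvWitness_get_reverse_r : Int × Int := (54, 1)

def Spec_get_reverse_r (i : Int) (j : Int) (out : Int) : Prop := out = get_reverse_r_alt i j
instance (i : Int) (j : Int) (out : Int) : Decidable (Spec_get_reverse_r i j out) := by unfold Spec_get_reverse_r; infer_instance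

-- ===== CLAIM (what is proved, stated in full; the proofs are below) =====
def Claim_equal_get_reverse_r : Prop := ∀ (i : Int) (j : Int), Dom_get_reverse_r i j → Pre_get_reverse_r i j → Spec_get_reverse_r i j (get_reverse_r i j)

-- ===== LEMMAS AND PROOFS =====

-- index of the first clear bit of s at or below k (meaningful for even s)
def pvFcb (s : Int) : Nat → Nat
  | 0 => 0
  | k+1 => if PySem.Int.band s (2^(k+1)) = 0 then k+1 else pvFcb s k

theorem pvFcb_le (s : Int) (k : Nat) : pvFcb s k ≤ k := by
  induction k with
  | zero => simp [pvFcb]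
  | succ k ih => unfold pvFcb; split <;> omega

theorem pvFcb_of_clear (s : Int) (k : Nat) (h : PySem.Int.band s (2^k) = 0) : pvFcb s k = k := by
  cases k with
  | zero => rfl
  | succ k => simp [pvFcb, h]

-- OR-ing a fresh higher power of two is addition
theorem pvBor_two_pow (res : Int) (t : Nat) (h0 : 0 ≤ res) (h1 : res < 2^t) :
    PySem.Int.bor res (2^t) = res + 2^t := by
  have h2 : ((2:Int)^t) = ((2^t : Nat) : Int) := by push_cast; ring
  have h3 : res = (res.toNat : Int) := by omega
  rw [h2, h3, PySem.Int.bor_natCast]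
  have h4 : res.toNat < 2^t := by omega
  have h5 := Nat.two_pow_add_eq_or_of_lt h4 1
  simp only [mul_one] at h5
  rw [Nat.lor_comm, ← h5]
  push_cast; ring

theorem pvShiftRight_pow (k : Nat) : ((2:Int)^(k+1)) >>> (1:Nat) = 2^k := by
  have h := Int.shiftRight_eq_div_pow ((2:Int)^(k+1)) 1
  rw [h, pow_succ]
  norm_num

theorem pvShiftLeft_pow (k : Nat) : ((2:Int)^k) <<< (1:Nat) = 2^(k+1) := by
  simpa [pow_succ] using Int.shiftLeft_eq ((2:Int)^k) 1

theorem pvEven (i : Int) : PySem.Int.band (i <<< (1:Nat)) 1 = 0 := by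
  rw [PySem.Int.band_one]
  simp [Int.shiftLeft_eq, PySem.Int.mod]

theorem pvNeedLoop_eq (s : Int) (hs : PySem.Int.band s 1 = 0) (k : Nat) :
    pvNeedLoop s (2^k) = 2^(pvFcb s k) := by
  induction k with
  | zero =>
      rw [pvNeedLoop]
      simp [pvFcb, hs]
  | succ k ih =>
      rw [pvNeedLoop]
      by_cases hb : PySem.Int.band s (2^(k+1)) = 0
      · simp [hb, pvFcb]
      · have hp : (0:Int) < 2^(k+1) := by positivity
        simp only [hp, hb, ne_eq, not_false_eq_true, and_self, dite_true]
        rw [pvShiftRight_pow, ih]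
        simp [pvFcb, hb]

theorem pvAccLoop_eq (s : Int) (hs : PySem.Int.band s 1 = 0) (k : Nat) (res : Int) :
    pvAccLoop s (2^k) res = res + (2^(k+1) - 2^(pvFcb s k + 1)) := by
  induction k generalizing res with
  | zero =>
      rw [pvAccLoop]
      simp [pvFcb, hs]
  | succ k ih =>
      rw [pvAccLoop]
      by_cases hb : PySem.Int.band s (2^(k+1)) = 0
      · simp [hb, pvFcb]
      · have hp : (0:Int) < 2^(k+1) := by positivity
        simp only [hp, hb, ne_eq, not_false_eq_true, and_self, dite_true]
        rw [pvShiftRight_pow, ih]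
        simp only [pvFcb, hb, if_false]
        ring

theorem pvRevLoop_eq (K t : Nat) (res : Int) (ht : t ≤ K) (h0 : 0 ≤ res) (h1 : res < 2^t) :
    pvRevLoop (2^K) (2^t) res = res + (2^K - 2^t) := by
  induction hn : K - t generalizing t res with
  | zero =>
      have : t = K := by omega
      subst this
      rw [pvRevLoop]
      simp
  | succ n ih =>
      have htK : t < K := by omega
      have hlt : (2:Int)^t < 2^K := pow_lt_pow_right₀ (by norm_num) htK
      have hp : (0:Int) < 2^t := by positivity
      rw [pvRevLoop]
      simp only [hp, hlt, and_self, dite_true]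
      rw [pvShiftLeft_pow, pvBor_two_pow res t h0 h1,
        ih (t+1) (res + 2^t) (by omega)
          (by positivity)
          (by have h : (2:Int)^(t+1) = 2^t + 2^t := by ring
              omega)
          (by omega)]
      ring

-- ===== VERDICT (by name: the statement is the Claim_ definition above) =====
theorem get_reverse_r_spec : Claim_equal_get_reverse_r := by
  intro i j _ hj
  have hs := pvEven i
  have hput : (1:Int) <<< (7 - j).toNat = 2^((7 - j).toNat) := by
    simpa using Int.shiftLeft_eq (1:Int) ((7 - j).toNat)
  show get_reverse_r i j = get_reverse_r_alt i j
  unfold get_reverse_r get_reverse_r_alt get_need_r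
  simp only [hput]
  generalize (7 - j).toNat = K
  cases K with
  | zero =>
      simp only [pow_zero]
      have h0 : (1:Int) >>> (1:Nat) = 0 := by decide
      simp [hs, h0, pvAccLoop]
  | succ k =>
      rw [pvShiftRight_pow]
      by_cases hb : PySem.Int.band (i <<< (1:Nat)) (2^(k+1)) = 0
      · by_cases hb2 : PySem.Int.band (i <<< (1:Nat)) (2^k) = 0
        · simp [hb, hb2, pvAccLoop_eq _ hs k 0, pvFcb_of_clear _ k hb2]
        · have hneed := pvNeedLoop_eq (i <<< (1:Nat)) hs k
          have hfk : pvFcb (i <<< (1:Nat)) k < k := by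
            cases k with
            | zero => exact absurd hs hb2
            | succ m =>
                have hle := pvFcb_le (i <<< (1:Nat)) m
                simp only [pvFcb, hb2, if_false] at *
                omega
          have hne : (2:Int)^(pvFcb (i <<< (1:Nat)) k) ≠ 0 := by positivity
          simp only [hb, ne_eq, not_true_eq_false, if_false, hb2, hneed, hne]
          rw [pvShiftLeft_pow,
            pvRevLoop_eq (k+1) (pvFcb (i <<< (1:Nat)) k + 1) 0 (by omega) le_rfl (by positivity),
            pvAccLoop_eq _ hs k 0]
      · simp [hb]
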